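-- pv_equiv track=rewrite | github.com/nash23234/Portafolio1.2 | Laboratorio2.py | numerosCompadresAux
-- ===== SOURCE A (Python) =====
-- def numerosCompadresAux(num,num1):
--     if num1<100:
--         return False
--     else:
--         if num==num1%1000:
--             return True
--         else:
--             return numerosCompadresAux(num,num1//10)
-- ===== SOURCE B (Python) =====
-- def numerosCompadresAux(num, num1):
--     # Two staged passes: extract the decimal digits of num1 (least significant
--     # first), then scan consecutive digit triples for one whose value is num.
--     if num1 < 100:
--         return False
--     digits = []
--     n = num1
--     while n > 0:
--         digits.append(n % 10)
--         n //= 10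
--     for d0, d1, d2 in zip(digits, digits[1:], digits[2:]):
--         if num == d0 + 10 * d1 + 100 * d2:
--             return True
--     return False
-- ===== Notes on version B (the rewrite author's own statement) =====
-- stated objective: alternative
-- what changed: Replaces the tail recursion doing %1000 and //10 per step with two staged passes: extract num1's decimal digits once, then scan consecutive digit triples (d0+10*d1+100*d2) for num.
import Mathlib
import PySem

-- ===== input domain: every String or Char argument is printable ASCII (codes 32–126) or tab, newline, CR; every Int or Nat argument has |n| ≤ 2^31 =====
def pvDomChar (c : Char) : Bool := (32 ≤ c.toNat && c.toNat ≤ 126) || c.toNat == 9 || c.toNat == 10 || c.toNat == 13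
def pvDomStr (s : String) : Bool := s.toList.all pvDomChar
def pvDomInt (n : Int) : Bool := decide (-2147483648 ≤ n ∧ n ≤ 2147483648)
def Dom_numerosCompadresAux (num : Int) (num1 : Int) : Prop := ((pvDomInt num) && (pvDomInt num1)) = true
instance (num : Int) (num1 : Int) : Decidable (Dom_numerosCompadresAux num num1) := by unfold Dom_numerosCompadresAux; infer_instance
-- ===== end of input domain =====

-- B replaces A's tail recursion (%1000 then //10 per step) by two staged passes:
-- extract num1's digits once, then scan consecutive digit triples; same values everywhere.

-- ===== PORT A =====
-- Fuel-based transliteration of A's recursion; fuel num1.toNat always suffices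
-- because the recursion continues only while num1 ≥ 100 and num1 strictly shrinks.
def pvAgo (num : Int) (fuel : Nat) (num1 : Int) : Bool :=
  match fuel with
  | 0 => false
  | f + 1 =>
    if num1 < 100 then false
    else
      if num == PySem.Int.mod num1 1000 then true
      else pvAgo num f (PySem.Int.floordiv num1 10)

def numerosCompadresAux (num : Int) (num1 : Int) : Bool :=
  pvAgo num num1.toNat num1

-- ===== PORT B =====
-- while n > 0: digits.append(n % 10); n //= 10   (fuel n.toNat suffices, n shrinks)
def pvDigits (fuel : Nat) (n : Int) : List Int :=
  match fuel with
  | 0 => []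
  | f + 1 =>
    if n > 0 then PySem.Int.mod n 10 :: pvDigits f (PySem.Int.floordiv n 10)
    else []

-- for d0, d1, d2 in zip(digits, digits[1:], digits[2:]): if num == d0+10*d1+100*d2: return True
def pvScanTriples (num : Int) : List Int → Bool
  | d0 :: d1 :: d2 :: rest =>
      if num == d0 + 10 * d1 + 100 * d2 then true
      else pvScanTriples num (d1 :: d2 :: rest)
  | _ => false

def numerosCompadresAux_alt (num : Int) (num1 : Int) : Bool :=
  if num1 < 100 then false
  else pvScanTriples num (pvDigits num1.toNat num1)

-- ===== PRECONDITION & SPEC =====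
def Spec_numerosCompadresAux (num : Int) (num1 : Int) (out : Bool) : Prop := out = numerosCompadresAux_alt num num1
instance (num : Int) (num1 : Int) (out : Bool) : Decidable (Spec_numerosCompadresAux num num1 out) := by unfold Spec_numerosCompadresAux; infer_instance

-- ===== CLAIM (what is proved, stated in full; the proofs are below) =====
def Claim_equal_numerosCompadresAux : Prop := ∀ (num : Int) (num1 : Int), Dom_numerosCompadresAux num num1 → Spec_numerosCompadresAux num num1 (numerosCompadresAux num num1)

-- ===== LEMMAS AND PROOFS =====
theorem pvDigits_pos (f : Nat) (n : Int) (h : 0 < n) :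
    pvDigits (f + 1) n = PySem.Int.mod n 10 :: pvDigits f (PySem.Int.floordiv n 10) := by
  rw [pvDigits, if_pos h]

-- core: A's recursion agrees with scanning the digit-triple list, given enough fuel
theorem pv_core (num : Int) (f : Nat) (num1 : Int) (hf : num1.toNat ≤ f) :
    pvAgo num f num1 = pvScanTriples num (pvDigits f num1) := by
  induction f generalizing num1 with
  | zero =>
      rw [pvAgo, pvDigits]; rfl
  | succ f ih =>
      by_cases h : num1 < 100
      · -- A returns false; digit list has length ≤ 2, so the scan is false too
        rw [pvAgo, if_pos h]
        have hlen : (pvDigits (f + 1) num1).length ≤ 2 := by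
          rw [pvDigits]
          split_ifs with h0
          · have e1 : PySem.Int.floordiv num1 10 = num1 / 10 :=
              PySem.Int.floordiv_eq_ediv_of_pos (by omega)
            cases f with
            | zero => simp [pvDigits]
            | succ g =>
              rw [pvDigits]
              split_ifs with h1
              · have e2 : PySem.Int.floordiv (PySem.Int.floordiv num1 10) 10
                    = num1 / 10 / 10 := by
                  rw [e1]; exact PySem.Int.floordiv_eq_ediv_of_pos (by omega)
                cases g with
                | zero => simp [pvDigits]
                | succ k =>
                  rw [pvDigits]
                  have : ¬ (0 : Int) < PySem.Int.floordiv (PySem.Int.floordiv num1 10) 10 := by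
                    rw [e2]; omega
                  rw [if_neg this]; simp
              · simp
          · simp
        match hl : pvDigits (f + 1) num1 with
        | [] => rfl
        | [_] => rfl
        | [_, _] => rfl
        | _ :: _ :: _ :: _ => rw [hl] at hlen; simp at hlen
      · -- num1 ≥ 100: expose three digits, fold them into num1 % 1000, recurse
        have h100 : (100 : Int) ≤ num1 := by omega
        have e1 : PySem.Int.floordiv num1 10 = num1 / 10 :=
          PySem.Int.floordiv_eq_ediv_of_pos (by omega)
        have hq1 : (10 : Int) ≤ num1 / 10 := by omega
        have hq1' : num1 / 10 < num1 := by omega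
        -- fuel is at least 3
        obtain ⟨g, rfl⟩ : ∃ g, f = g + 1 := ⟨f - 1, by omega⟩
        obtain ⟨k, rfl⟩ : ∃ k, g = k + 1 := ⟨g - 1, by omega⟩
        have e2 : PySem.Int.floordiv (num1 / 10) 10 = num1 / 10 / 10 :=
          PySem.Int.floordiv_eq_ediv_of_pos (by omega)
        rw [pvAgo, if_neg h,
          pvDigits_pos _ _ (by omega), e1,
          pvDigits_pos _ _ (by omega : (0:Int) < num1 / 10), e2,
          pvDigits_pos _ _ (by omega : (0:Int) < num1 / 10 / 10)]
        rw [pvScanTriples]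
        have hm : PySem.Int.mod num1 10 + 10 * PySem.Int.mod (num1 / 10) 10
            + 100 * PySem.Int.mod (num1 / 10 / 10) 10 = PySem.Int.mod num1 1000 := by
          rw [PySem.Int.mod_eq_emod_of_pos (by omega),
            PySem.Int.mod_eq_emod_of_pos (by omega),
            PySem.Int.mod_eq_emod_of_pos (by omega),
            PySem.Int.mod_eq_emod_of_pos (by omega)]
          omega
        rw [hm]
        split_ifs with he
        · rfl
        · -- recursive case: both sides scan the digits of num1 // 10
          have := ih (num1 / 10) (by omega)
          rw [this,
            pvDigits_pos _ _ (by omega : (0:Int) < num1 / 10), e2,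
            pvDigits_pos _ _ (by omega : (0:Int) < num1 / 10 / 10)]

-- ===== VERDICT (by name: the statement is the Claim_ definition above) =====
theorem numerosCompadresAux_spec : Claim_equal_numerosCompadresAux := by
  intro num num1 _
  unfold Spec_numerosCompadresAux numerosCompadresAux numerosCompadresAux_alt
  by_cases h : num1 < 100
  · rw [if_pos h]
    cases hn : num1.toNat with
    | zero => rfl
    | succ f => rw [pvAgo, if_pos h]
  · rw [if_neg h]
    exact pv_core num num1.toNat num1 le_rfl
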